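-- pv_equiv track=rewrite | github.com/BarquistLab/mason | browser/pnag/pna_utils.py | calculate_purine_stats
-- ===== SOURCE A (Python) =====
-- def calculate_purine_stats(sequence):
--     """Calculate purine percentage and longest purine stretch for a sequence.
--
--     Args:
--         sequence: DNA sequence (str or Bio.Seq object)
--
--     Returns:
--         tuple: (purine_percentage_str, longest_purine_stretch)
--             purine_percentage_str is formatted as "XX.XX"
--     """
--     seq_str = str(sequence)
--     pur = 0
--     longest_purine_stretch = 0
--     curstretch = 0
--     for base in seq_str:
--         if base in ("A", "G"):
--             curstretch += 1
--             pur += 1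
--             if curstretch > longest_purine_stretch:
--                 longest_purine_stretch += 1
--         else:
--             curstretch = 0
--     pur_perc = "{:.2f}".format((pur / len(seq_str)) * 100)
--     return pur_perc, longest_purine_stretch
-- ===== SOURCE B (Python) =====
-- def calculate_purine_stats(sequence):
--     """Calculate purine percentage and longest purine stretch for a sequence."""
--     seq_str = str(sequence)
--     runs = "".join(c if c in "AG" else " " for c in seq_str).split()
--     longest_purine_stretch = max(map(len, runs), default=0)
--     pur = seq_str.count("A") + seq_str.count("G")
--     pur_perc = "{:.2f}".format((pur / len(seq_str)) * 100)
--     return pur_perc, longest_purine_stretch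
-- ===== Notes on version B (the rewrite author's own statement) =====
-- stated objective: alternative
-- what changed: A's single incremental scan with (pur, longest, curstretch) state is replaced by staged whole-string passes: materialise the purine runs (blank every non-purine to a space, then str.split) and take max of their lengths with default 0, and count the purines directly with two str.count passes; the percentage is formatted by the identical two-decimal format expression as in A, so the ZeroDivisionError on the empty string is preserved and excluded by Pre_.
import Mathlib
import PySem

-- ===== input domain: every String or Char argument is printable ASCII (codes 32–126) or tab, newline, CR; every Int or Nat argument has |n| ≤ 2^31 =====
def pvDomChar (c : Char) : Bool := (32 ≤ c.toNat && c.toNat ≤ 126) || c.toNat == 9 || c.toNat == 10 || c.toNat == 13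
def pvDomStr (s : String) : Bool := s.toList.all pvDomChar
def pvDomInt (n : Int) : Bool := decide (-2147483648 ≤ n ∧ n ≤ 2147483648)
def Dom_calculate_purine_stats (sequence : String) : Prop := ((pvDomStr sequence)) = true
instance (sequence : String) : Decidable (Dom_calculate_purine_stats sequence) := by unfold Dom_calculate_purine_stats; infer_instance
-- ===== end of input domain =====

-- B replaces A's incremental (pur, longest, curstretch) scan by staged whole-string passes:
-- materialise the purine runs (blank out non-purines, str.split) and take the max run length,
-- and count the purines directly with str.count — a different decomposition (objective:
-- alternative, not faster).

-- ===== PORT A =====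

-- ---- float helper shared by both ports: each Python ends with the identical expression
-- ---- "{:.2f}".format((pur / len(seq_str)) * 100).  pvRnde is round-half-even of N/D;
-- ---- pvDbl rounds the positive rational num/den to the nearest IEEE double m/2^s
-- ---- (2^52 ≤ m < 2^53); pvFmt2 performs CPython's two roundings (the division, then ×100.0)
-- ---- followed by the two-decimal rendering, ties to even — exact on this file's values.
def pvRnde (N D : Nat) : Nat :=
  N / D + (if D < 2 * (N % D) ∨ (2 * (N % D) = D ∧ (N / D) % 2 = 1) then 1 else 0)

def pvDbl (num den : Nat) : Nat × Nat :=
  let k := 55 + Nat.log2 den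
  let sh := Nat.log2 (num * 2 ^ k / den) - 52
  let m := pvRnde (num * 2 ^ k) (den * 2 ^ sh)
  if m = 2 ^ 53 then (2 ^ 52, k - sh - 1) else (m, k - sh)

def pvFmt2 (pur : Int) (n : Nat) : String :=
  if pur ≤ 0 then "0.00" else
  let a := pvDbl pur.toNat n
  let b := pvDbl (a.1 * 100) (2 ^ a.2)
  let c := pvRnde (b.1 * 100) (2 ^ b.2)
  PySem.Int.toStr (c / 100) ++ "." ++ (if c % 100 < 10 then "0" else "") ++ PySem.Int.toStr (c % 100)
-- ---- end of shared float helper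

-- A's loop body; state = (pur, longest_purine_stretch, curstretch); `base in ("A", "G")`
def pvStepA (s : Int × Int × Int) (base : Char) : Int × Int × Int :=
  if base == 'A' || base == 'G' then
    let curstretch := s.2.2 + 1
    let pur := s.1 + 1
    let longest := if s.2.1 < curstretch then s.2.1 + 1 else s.2.1
    (pur, longest, curstretch)
  else (s.1, s.2.1, 0)

def calculate_purine_stats (sequence : String) : String × Int :=
  let seq_str := sequence.toList
  let r := seq_str.foldl pvStepA (0, 0, 0)
  (pvFmt2 r.1 seq_str.length, r.2.1)

-- ===== PORT B =====

-- `c if c in "AG" else " "`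
def pvBlank (c : Char) : Char := if c == 'A' || c == 'G' then c else ' '

def calculate_purine_stats_alt (sequence : String) : String × Int :=
  let seq_str := sequence.toList
  let runs := PySem.Chars.split₀ (seq_str.map pvBlank)
  let longest_purine_stretch := PySem.List.maxD (runs.map (fun r => (r.length : Int))) (fun x => x) 0
  let pur : Int := (PySem.Chars.count seq_str ['A'] : Int) + (PySem.Chars.count seq_str ['G'] : Int)
  (pvFmt2 pur seq_str.length, longest_purine_stretch)

-- ===== PRECONDITION & SPEC =====
-- Pre_ excludes only the empty string, on which Python A (and B) raises ZeroDivisionError.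
def Pre_calculate_purine_stats (sequence : String) : Prop := sequence ≠ ""
instance (sequence : String) : Decidable (Pre_calculate_purine_stats sequence) := by
  unfold Pre_calculate_purine_stats; infer_instance

def pvWitness_calculate_purine_stats : String := "AG"

def Spec_calculate_purine_stats (sequence : String) (out : String × Int) : Prop := out = calculate_purine_stats_alt sequence
instance (sequence : String) (out : String × Int) : Decidable (Spec_calculate_purine_stats sequence out) := by unfold Spec_calculate_purine_stats; infer_instance

-- ===== CLAIM (what is proved, stated in full; the proofs are below) =====
def Claim_equal_calculate_purine_stats : Prop := ∀ (sequence : String), Dom_calculate_purine_stats sequence → Pre_calculate_purine_stats sequence → Spec_calculate_purine_stats sequence (calculate_purine_stats sequence)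

-- ===== LEMMAS AND PROOFS =====

-- the purine test both Pythons spell (`in ("A","G")` / `in "AG"`), as a proof-side name
def pvIsPur (c : Char) : Bool := c == 'A' || c == 'G'

-- lengths of the maximal purine runs of l, with `cur` purines already pending
def pvRunLens (l : List Char) (cur : Nat) : List Nat :=
  match l with
  | [] => if cur = 0 then [] else [cur]
  | c :: t => if pvIsPur c then pvRunLens t (cur+1)
              else if cur = 0 then pvRunLens t 0 else cur :: pvRunLens t 0

-- length of the trailing purine run (A's final curstretch)
def pvTailRun (l : List Char) (cur : Nat) : Nat :=
  match l with
  | [] => cur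
  | c :: t => pvTailRun t (if pvIsPur c then cur+1 else 0)

lemma pv_isspace_of_pur {c : Char} (h : pvIsPur c = true) : PySem.Chars.isspace c = false := by
  simp [pvIsPur] at h
  rcases h with h | h <;> subst h <;> decide

lemma pv_foldl_max_init (l : List Nat) (a b : Nat) :
    l.foldl max (max a b) = max a (l.foldl max b) := by
  induction l generalizing b with
  | nil => rfl
  | cons x t ih =>
      simp only [List.foldl_cons]
      rw [Nat.max_assoc]
      exact ih (max b x)

lemma pv_le_runLens_max (l : List Char) (cur : Nat) (h : 0 < cur) :
    cur ≤ (pvRunLens l cur).foldl max 0 := by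
  induction l generalizing cur with
  | nil =>
      have hc : cur ≠ 0 := by omega
      simp [pvRunLens, hc]
  | cons c t ih =>
      rw [pvRunLens]
      by_cases hp : pvIsPur c = true
      · rw [if_pos hp]
        have := ih (cur + 1) (by omega)
        omega
      · have hc : cur ≠ 0 := by omega
        rw [if_neg hp, if_neg hc]
        simp only [List.foldl_cons]
        rw [Nat.max_comm 0 cur, pv_foldl_max_init]
        exact Nat.le_max_left _ _

lemma pv_foldA_spec (l : List Char) (pur long cur : Nat) (h : cur ≤ long) :
    l.foldl pvStepA ((pur : Int), (long : Int), (cur : Int))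
      = (((pur + l.countP pvIsPur : Nat) : Int),
         ((max long ((pvRunLens l cur).foldl max 0) : Nat) : Int),
         ((pvTailRun l cur : Nat) : Int)) := by
  induction l generalizing pur long cur with
  | nil =>
      rw [pvRunLens, pvTailRun]
      by_cases hc : cur = 0
      · simp [hc]
      · rw [if_neg hc]
        simp only [List.foldl_nil, List.countP_nil, List.foldl_cons, Prod.mk.injEq]
        refine ⟨by push_cast; ring, ?_, by trivial⟩
        congr 1
        omega
  | cons c t ih =>
      by_cases hp : pvIsPur c = true
      · have hp' : (c == 'A' || c == 'G') = true := hp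
        have hstep : pvStepA ((pur : Int), (long : Int), (cur : Int)) c
            = (((pur + 1 : Nat) : Int), ((max long (cur + 1) : Nat) : Int), ((cur + 1 : Nat) : Int)) := by
          simp only [pvStepA, hp', if_true, Prod.mk.injEq]
          refine ⟨by push_cast; ring, ?_, by push_cast; ring⟩
          push_cast
          split_ifs <;> omega
        have hM := pv_le_runLens_max t (cur + 1) (by omega)
        rw [List.foldl_cons, hstep,
            ih (pur + 1) (max long (cur + 1)) (cur + 1) (Nat.le_max_right _ _)]
        rw [pvRunLens, pvTailRun, List.countP_cons]
        simp only [hp, if_true, Prod.mk.injEq]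
        refine ⟨by push_cast; omega, by push_cast; omega, trivial⟩
      · have hp' : ¬ ((c == 'A' || c == 'G') = true) := hp
        have hstep : pvStepA ((pur : Int), (long : Int), (cur : Int)) c
            = ((pur : Int), (long : Int), ((0 : Nat) : Int)) := by
          simp [pvStepA, hp']
        rw [List.foldl_cons, hstep, ih pur long 0 (Nat.zero_le _)]
        rw [pvRunLens, pvTailRun, List.countP_cons]
        simp only [hp, Bool.false_eq_true, if_false, Prod.mk.injEq]
        by_cases hc : cur = 0
        · simp [hc]
        · rw [if_neg hc]
          have hrw : (cur :: pvRunLens t 0).foldl max 0 = max cur ((pvRunLens t 0).foldl max 0) := by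
            rw [List.foldl_cons, Nat.max_comm 0 cur, pv_foldl_max_init]
          rw [hrw]
          refine ⟨by push_cast; omega, by push_cast; omega, trivial⟩

lemma pv_go_spec (l : List Char) (cur : List Char) (acc : List (List Char)) :
    (PySem.Chars.split₀.go (l.map pvBlank) cur acc).map List.length
      = acc.reverse.map List.length ++ pvRunLens l cur.length := by
  have hsp : PySem.Chars.isspace ' ' = true := by decide
  induction l generalizing cur acc with
  | nil =>
      by_cases hc : cur = []
      · simp [PySem.Chars.split₀.go, hc, pvRunLens]
      · have hlen : cur.length ≠ 0 := by simpa using hc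
        simp [PySem.Chars.split₀.go, hc, pvRunLens, hlen]
  | cons c t ih =>
      by_cases hp : pvIsPur c = true
      · have hb : pvBlank c = c := by
          have hp' : (c == 'A' || c == 'G') = true := hp
          simp [pvBlank, hp']
        have hs := pv_isspace_of_pur hp
        simp only [List.map_cons, hb]
        rw [show PySem.Chars.split₀.go (c :: t.map pvBlank) cur acc
              = PySem.Chars.split₀.go (t.map pvBlank) (c :: cur) acc by
            simp [PySem.Chars.split₀.go, hs]]
        rw [ih (c :: cur) acc]
        simp [pvRunLens, hp]
      · have hb : pvBlank c = ' ' := by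
          have hp' : ¬ ((c == 'A' || c == 'G') = true) := hp
          simp [pvBlank, hp']
        simp only [List.map_cons, hb]
        by_cases hc : cur = []
        · rw [show PySem.Chars.split₀.go (' ' :: t.map pvBlank) cur acc
                = PySem.Chars.split₀.go (t.map pvBlank) [] acc by
              simp [PySem.Chars.split₀.go, hc, hsp]]
          rw [ih [] acc]
          simp [pvRunLens, hp, hc]
        · rw [show PySem.Chars.split₀.go (' ' :: t.map pvBlank) cur acc
                = PySem.Chars.split₀.go (t.map pvBlank) [] (cur.reverse :: acc) by
              simp [PySem.Chars.split₀.go, hc, hsp]]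
          rw [ih [] (cur.reverse :: acc)]
          have hlen : cur.length ≠ 0 := by simpa using hc
          simp [pvRunLens, hp, hlen]

lemma pv_cast_foldl_max (t : List Nat) (a : Nat) :
    (t.map (Nat.cast : Nat → Int)).foldl max ((a : Nat) : Int) = ((t.foldl max a : Nat) : Int) := by
  induction t generalizing a with
  | nil => rfl
  | cons x s ih =>
      simp only [List.map_cons, List.foldl_cons]
      rw [← Nat.cast_max, ih (max a x)]

-- str.count with a single-character needle is List.count
lemma pv_count_go_single (c : Char) (l : List Char) (fuel acc : Nat) (h : l.length ≤ fuel) :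
    PySem.Chars.count.go [c] fuel l acc = acc + l.count c := by
  induction l generalizing fuel acc with
  | nil => cases fuel <;> simp [PySem.Chars.count.go]
  | cons x t ih =>
      cases fuel with
      | zero => simp at h
      | succ f =>
          rw [PySem.Chars.count.go]
          by_cases hx : c = x
          · subst hx
            have hpre : [c].isPrefixOf (c :: t) = true := by simp [List.isPrefixOf]
            simp only [hpre, if_true, List.length_singleton, List.drop_one, List.tail_cons]
            rw [ih f (acc + 1) (by simpa using h)]
            rw [List.count_cons]
            simp
            omega
          · have hpre : [c].isPrefixOf (x :: t) = false := by
              simp [List.isPrefixOf]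
              exact fun hb => hx (by simpa using hb)
            simp only [hpre, Bool.false_eq_true, if_false]
            rw [ih f acc (by simpa using h)]
            have : (x == c) = false := by simpa using fun hb => hx (by simp_all)
            simp [List.count_cons, this]

lemma pv_chars_count_single (c : Char) (l : List Char) :
    PySem.Chars.count l [c] = l.count c := by
  rw [PySem.Chars.count]
  simp only [List.isEmpty_cons, if_false, Bool.false_eq_true]
  rw [pv_count_go_single c l l.length 0 (le_refl _)]
  omega

lemma pv_countP_split (l : List Char) :
    l.countP pvIsPur = l.count 'A' + l.count 'G' := by
  induction l with
  | nil => simp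
  | cons c t ih =>
      rw [List.countP_cons, List.count_cons, List.count_cons, ih]
      by_cases hA : c = 'A'
      · subst hA; simp [pvIsPur]; omega
      · by_cases hG : c = 'G'
        · subst hG; simp [pvIsPur]; omega
        · have h1 : (c == 'A') = false := by simpa using hA
          have h2 : (c == 'G') = false := by simpa using hG
          simp [pvIsPur, h1, h2]

-- ===== VERDICT (by name: the statement is the Claim_ definition above) =====
set_option maxRecDepth 4096 in
theorem calculate_purine_stats_spec : Claim_equal_calculate_purine_stats := by
  intro sequence _ _
  unfold Spec_calculate_purine_stats
  unfold calculate_purine_stats calculate_purine_stats_alt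
  have hA := pv_foldA_spec sequence.toList 0 0 0 (Nat.le_refl 0)
  norm_num at hA
  have hB : (PySem.Chars.split₀ (sequence.toList.map pvBlank)).map List.length
      = pvRunLens sequence.toList 0 := by
    rw [show PySem.Chars.split₀ (sequence.toList.map pvBlank)
          = PySem.Chars.split₀.go (sequence.toList.map pvBlank) [] [] from rfl,
        pv_go_spec]
    rfl
  have hmap : (PySem.Chars.split₀ (sequence.toList.map pvBlank)).map (fun r => (r.length : Int))
      = (pvRunLens sequence.toList 0).map (Nat.cast : Nat → Int) := by
    rw [← hB, List.map_map]
    rfl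
  simp only [hmap]
  rw [hA]
  simp only [Prod.mk.injEq]
  constructor
  · -- percentage strings agree: A's running pur count = B's count('A') + count('G')
    congr 1
    rw [pv_chars_count_single, pv_chars_count_single, pv_countP_split]
    push_cast
    ring
  · -- longest stretch
    unfold PySem.List.maxD
    cases hE : pvRunLens sequence.toList 0 with
    | nil => simp [PySem.List.max?]
    | cons x t =>
        simp only [List.map_cons]
        rw [PySem.List.max?_id_cons]
        simp only [Option.getD_some]
        rw [pv_cast_foldl_max]
        have hfx : (x :: t).foldl max 0 = t.foldl max x := by
          rw [List.foldl_cons, Nat.zero_max]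
        rw [hfx]
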